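-- pv_equiv track=rewrite | github.com/AyayaXiaowang/Ayaya_Miliastra_Editor | private_extensions/ugc_file_tools/contracts/node_graph_type_mappings.py | map_type_mapping_token_to_server_var_type_int
-- ===== SOURCE A (Python) =====
-- def map_type_mapping_token_to_server_var_type_int(type_token: str) -> int | None:
--     """
--     将 node_data/index.json TypeMappings 的 token（如 Ety / Int / Str / L<Int>）映射为 server VarType(int)。
--     """
--     token = str(type_token or "").strip()
--     if token == "":
--         return None
--     base_map: dict[str, int] = {
--         "Ety": 1,
--         "Gid": 2,
--         "Int": 3,
--         "Bol": 4,
--         "Flt": 5,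
--         "Str": 6,
--         "Vec": 12,
--         "Fct": 17,
--         "Cfg": 20,
--         "Pfb": 21,
--     }
--     if token in base_map:
--         return int(base_map[token])
--     if token.startswith("L<") and token.endswith(">") and len(token) > 3:
--         inner = token[2:-1].strip()
--         elem = map_type_mapping_token_to_server_var_type_int(inner)
--         if elem is None:
--             return None
--         list_map: dict[int, int] = {
--             1: 13,  # EtyList
--             2: 7,  # GidList
--             3: 8,  # IntList
--             4: 9,  # BoolList
--             5: 10,  # FloatList
--             6: 11,  # StringList
--             12: 15,  # VecList
--             17: 24,  # FctList / CampList
--             20: 22,  # CfgList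
--             21: 23,  # PfbList / ComponentIdList
--         }
--         return int(list_map.get(int(elem))) if int(elem) in list_map else None
--     return None
-- ===== SOURCE B (Python) =====
-- _BASE_MAP = {
--     "Ety": 1, "Gid": 2, "Int": 3, "Bol": 4, "Flt": 5,
--     "Str": 6, "Vec": 12, "Fct": 17, "Cfg": 20, "Pfb": 21,
-- }
-- # list VarType keyed by the element's base VarType
-- _LIST_MAP = {1: 13, 2: 7, 3: 8, 4: 9, 5: 10, 6: 11, 12: 15, 17: 24, 20: 22, 21: 23}
--
-- def map_type_mapping_token_to_server_var_type_int(type_token: str) -> int | None: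
--     token = str(type_token or "").strip()
--     if token in _BASE_MAP:
--         return _BASE_MAP[token]
--     if token.startswith("L<") and token.endswith(">") and len(token) > 3:
--         elem = _BASE_MAP.get(token[2:-1].strip())
--         if elem is not None:
--             return _LIST_MAP.get(elem)
--     return None
-- ===== Notes on version B (the rewrite author's own statement) =====
-- stated objective: simpler
-- what changed: B drops A's self-recursion and empty-token special case: after the base-map lookup it resolves the L<...> case flatly by one base-map lookup of the stripped inner token followed by one list-map lookup (nested L<L<..>> tokens fall through to None exactly as in A).
import Mathlib
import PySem

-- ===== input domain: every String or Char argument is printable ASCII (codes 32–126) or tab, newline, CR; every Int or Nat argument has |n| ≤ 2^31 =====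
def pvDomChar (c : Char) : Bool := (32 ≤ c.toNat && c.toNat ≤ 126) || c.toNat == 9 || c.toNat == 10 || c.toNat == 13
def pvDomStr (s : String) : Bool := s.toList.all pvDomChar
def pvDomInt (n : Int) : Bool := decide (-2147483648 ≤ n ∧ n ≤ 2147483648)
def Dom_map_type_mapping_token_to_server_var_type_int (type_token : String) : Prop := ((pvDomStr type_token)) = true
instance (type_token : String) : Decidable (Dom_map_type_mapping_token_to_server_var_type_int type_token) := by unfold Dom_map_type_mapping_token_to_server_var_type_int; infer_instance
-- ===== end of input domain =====

-- B replaces A's self-recursion on the L<...> inner token by a flat base-map lookup; simpler decomposition, same values.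

-- ===== PORT A =====
-- the literal dicts of A
def pvBaseMapA : PySem.Dict String Int :=
  PySem.Dict.ofList [("Ety", 1), ("Gid", 2), ("Int", 3), ("Bol", 4), ("Flt", 5),
                     ("Str", 6), ("Vec", 12), ("Fct", 17), ("Cfg", 20), ("Pfb", 21)]
def pvListMapA : PySem.Dict Int Int :=
  PySem.Dict.ofList [(1, 13), (2, 7), (3, 8), (4, 9), (5, 10), (6, 11), (12, 15), (17, 24), (20, 22), (21, 23)]

-- port of A; local variables `token` / `inner` are inlined (written out at each use).
-- The self-recursion is run on a structural fuel counter; the wrapper passes fuel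
-- exceeding the string length, which the recursion (each call strips > 3 chars) never exhausts.
def pvA_go : Nat → String → Option Int
  | 0, _ => none  -- unreachable: fuel always exceeds the argument's length
  | fuel + 1, type_token =>
    -- token = str(type_token or "").strip()  (`str(… or "")` is the identity on a str argument)
    if PySem.Str.strip type_token = "" then none
    else if pvBaseMapA.contains (PySem.Str.strip type_token) = true then
      pvBaseMapA.get? (PySem.Str.strip type_token)
    else if PySem.Str.startswith (PySem.Str.strip type_token) "L<" = true ∧
            PySem.Str.endswith (PySem.Str.strip type_token) ">" = true ∧
            3 < PySem.Str.len (PySem.Str.strip type_token) then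
      -- inner = token[2:-1].strip(); elem = recursive call
      match pvA_go fuel
          (PySem.Str.strip (PySem.Str.slice (PySem.Str.strip type_token) (some 2) (some (-1)))) with
      | none => none
      | some elem =>
          if pvListMapA.contains elem = true then pvListMapA.get? elem else none
    else none

def map_type_mapping_token_to_server_var_type_int (type_token : String) : Option Int :=
  pvA_go (type_token.toList.length + 1) type_token

-- ===== PORT B =====
-- B's module-level dicts hold the same pairs as A's literals, so the two ports share pvBaseMapA / pvListMapA

-- port of B; `token` and the inner token are inlined (written out at each use)
def map_type_mapping_token_to_server_var_type_int_alt (type_token : String) : Option Int :=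
  if pvBaseMapA.contains (PySem.Str.strip type_token) = true then
    pvBaseMapA.get? (PySem.Str.strip type_token)
  else if PySem.Str.startswith (PySem.Str.strip type_token) "L<" = true ∧
          PySem.Str.endswith (PySem.Str.strip type_token) ">" = true ∧
          3 < PySem.Str.len (PySem.Str.strip type_token) then
    -- elem = _BASE_MAP.get(token[2:-1].strip()); if elem is not None: return _LIST_MAP.get(elem)
    match pvBaseMapA.get?
        (PySem.Str.strip (PySem.Str.slice (PySem.Str.strip type_token) (some 2) (some (-1)))) with
    | some elem => pvListMapA.get? elem
    | none => none
  else none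

-- ===== PRECONDITION & SPEC =====
def Spec_map_type_mapping_token_to_server_var_type_int (type_token : String) (out : Option Int) : Prop := out = map_type_mapping_token_to_server_var_type_int_alt type_token
instance (type_token : String) (out : Option Int) : Decidable (Spec_map_type_mapping_token_to_server_var_type_int type_token out) := by unfold Spec_map_type_mapping_token_to_server_var_type_int; infer_instance

-- ===== CLAIM (what is proved, stated in full; the proofs are below) =====
def Claim_equal_map_type_mapping_token_to_server_var_type_int : Prop := ∀ (type_token : String), Dom_map_type_mapping_token_to_server_var_type_int type_token → Spec_map_type_mapping_token_to_server_var_type_int type_token (map_type_mapping_token_to_server_var_type_int type_token)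

-- ===== LEMMAS AND PROOFS =====

-- the recursive call's argument is strictly shorter (so the fuel never runs out)
theorem pv_strip_len_le (l : List Char) : (PySem.Chars.strip l).length ≤ l.length := by
  unfold PySem.Chars.strip PySem.Chars.lstrip PySem.Chars.rstrip
  have h1 := List.length_dropWhile_le PySem.Chars.isspace l
  have h2 := List.length_dropWhile_le PySem.Chars.isspace
      (List.dropWhile PySem.Chars.isspace l).reverse
  simp only [List.length_reverse] at h2 ⊢
  omega

theorem pv_slice_len (y : List Char) (h : 3 < y.length) :
    (PySem.List.slice y (some 2) (some (-1))).length = y.length - 3 := by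
  have hne : y ≠ [] := by intro h'; subst h'; simp at h
  simp [PySem.List.slice, PySem.List.clampIdx, hne]
  omega

theorem pv_term (s : String) (h : 3 < PySem.Str.len (PySem.Str.strip s)) :
    (PySem.Str.strip (PySem.Str.slice (PySem.Str.strip s) (some 2) (some (-1)))).toList.length
      < s.toList.length := by
  have hlen : 3 < (PySem.Chars.strip s.toList).length := by
    rw [PySem.Str.len_eq, PySem.Str.toList_strip] at h
    exact_mod_cast h
  have e1 : (PySem.Str.strip (PySem.Str.slice (PySem.Str.strip s) (some 2) (some (-1)))).toList
      = PySem.Chars.strip (PySem.List.slice (PySem.Chars.strip s.toList) (some 2) (some (-1))) := by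
    rw [PySem.Str.toList_strip, PySem.Str.toList_slice, PySem.Str.toList_strip,
        PySem.Chars.slice_eq_listSlice]
  rw [e1]
  have h2 := pv_strip_len_le (PySem.List.slice (PySem.Chars.strip s.toList) (some 2) (some (-1)))
  have h3 := pv_slice_len (PySem.Chars.strip s.toList) hlen
  have h4 := pv_strip_len_le s.toList
  omega


theorem pv_dw_idem (p : Char → Bool) (l : List Char) :
    List.dropWhile p (List.dropWhile p l) = List.dropWhile p l := by
  induction l with
  | nil => simp
  | cons a l ih => by_cases h : p a <;> simp [h, ih]

theorem pv_dw_prefix {p : Char → Bool} {z y : List Char} (hz : z <+: y)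
    (hy : List.dropWhile p y = y) : List.dropWhile p z = z := by
  cases z with
  | nil => simp
  | cons a z' =>
    obtain ⟨r, rfl⟩ := hz
    by_cases hpa : p a
    · exfalso
      have hlen := List.length_dropWhile_le p (z' ++ r)
      have : List.dropWhile p (a :: z' ++ r) = List.dropWhile p (z' ++ r) := by
        simp [hpa]
      rw [this] at hy
      have := congrArg List.length hy
      simp [List.length_append] at this hlen
      omega
    · simp [hpa]

theorem pv_strip_idem (l : List Char) :
    PySem.Chars.strip (PySem.Chars.strip l) = PySem.Chars.strip l := by
  unfold PySem.Chars.strip PySem.Chars.lstrip PySem.Chars.rstrip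
  have hA : List.dropWhile PySem.Chars.isspace
      (List.dropWhile PySem.Chars.isspace
        (List.dropWhile PySem.Chars.isspace l).reverse).reverse
      = (List.dropWhile PySem.Chars.isspace
          (List.dropWhile PySem.Chars.isspace l).reverse).reverse := by
    apply pv_dw_prefix (y := List.dropWhile PySem.Chars.isspace l)
    · have hs := List.dropWhile_suffix (l := (List.dropWhile PySem.Chars.isspace l).reverse)
        PySem.Chars.isspace
      have := List.reverse_prefix.mpr hs
      simpa using this
    · exact pv_dw_idem _ _
  rw [hA, List.reverse_reverse, pv_dw_idem]

theorem pv_str_strip_idem (x : String) :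
    PySem.Str.strip (PySem.Str.strip x) = PySem.Str.strip x := by
  show String.ofList (PySem.Chars.strip (PySem.Str.strip x).toList) = _
  rw [PySem.Str.toList_strip, pv_strip_idem]
  rfl

-- dict facts
theorem pv_contains_eq_isSome {κ ν : Type} [BEq κ] (d : PySem.Dict κ ν) (k : κ) :
    d.contains k = (d.get? k).isSome := by
  simp only [PySem.Dict.contains, PySem.Dict.get?, Option.isSome_map]
  induction d.items with
  | nil => simp
  | cons p rest ih => cases hp : p.1 == k <;> simp [List.any_cons, hp, ih]

theorem pv_not_contains_get? {κ ν : Type} [BEq κ] (d : PySem.Dict κ ν) (k : κ)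
    (h : ¬ d.contains k = true) : d.get? k = none := by
  rw [pv_contains_eq_isSome] at h
  cases hk : d.get? k with
  | none => rfl
  | some v => rw [hk] at h; exact absurd rfl h

def pvF (e : Int) : Option Int := pvListMapA.get? e

theorem pv_ifL (e : Int) :
    (if pvListMapA.contains e = true then pvListMapA.get? e else none) = pvF e := by
  by_cases h : pvListMapA.contains e = true
  · simp [h, pvF]
  · simp [h, pvF, pv_not_contains_get? _ _ h]

theorem pv_baseA_mk : pvBaseMapA =
    ⟨[("Ety", 1), ("Gid", 2), ("Int", 3), ("Bol", 4), ("Flt", 5),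
      ("Str", 6), ("Vec", 12), ("Fct", 17), ("Cfg", 20), ("Pfb", 21)]⟩ := by decide

theorem pv_double_none (k : String) :
    ((pvBaseMapA.get? k).bind pvF).bind pvF = none := by
  rw [pv_baseA_mk]
  rw [PySem.Dict.get?_mk_cons, PySem.Dict.get?_mk_cons, PySem.Dict.get?_mk_cons,
      PySem.Dict.get?_mk_cons, PySem.Dict.get?_mk_cons, PySem.Dict.get?_mk_cons,
      PySem.Dict.get?_mk_cons, PySem.Dict.get?_mk_cons, PySem.Dict.get?_mk_cons,
      PySem.Dict.get?_mk_cons]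
  by_cases h0 : ("Ety" == k) = true
  · rw [if_pos h0]; decide
  · rw [if_neg h0]
    by_cases h1 : ("Gid" == k) = true
    · rw [if_pos h1]; decide
    · rw [if_neg h1]
      by_cases h2 : ("Int" == k) = true
      · rw [if_pos h2]; decide
      · rw [if_neg h2]
        by_cases h3 : ("Bol" == k) = true
        · rw [if_pos h3]; decide
        · rw [if_neg h3]
          by_cases h4 : ("Flt" == k) = true
          · rw [if_pos h4]; decide
          · rw [if_neg h4]
            by_cases h5 : ("Str" == k) = true
            · rw [if_pos h5]; decide
            · rw [if_neg h5]
              by_cases h6 : ("Vec" == k) = true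
              · rw [if_pos h6]; decide
              · rw [if_neg h6]
                by_cases h7 : ("Fct" == k) = true
                · rw [if_pos h7]; decide
                · rw [if_neg h7]
                  by_cases h8 : ("Cfg" == k) = true
                  · rw [if_pos h8]; decide
                  · rw [if_neg h8]
                    by_cases h9 : ("Pfb" == k) = true
                    · rw [if_pos h9]; decide
                    · rw [if_neg h9]
                      rw [show (PySem.Dict.mk ([] : List (String × Int))).get? k = none from rfl]
                      rfl

-- key lemma: A's value, pushed through the list map, only depends on the base lookup of the stripped token
theorem pv_bindL_aux (fuel : Nat) : ∀ (u : String), u.toList.length < fuel →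
    (pvA_go fuel u).bind pvF = (pvBaseMapA.get? (PySem.Str.strip u)).bind pvF := by
  induction fuel with
  | zero => intro u hu; omega
  | succ n ih =>
    intro u hu
    simp only [pvA_go]
    by_cases h0 : PySem.Str.strip u = ""
    · rw [if_pos h0, h0]
      simp [show pvBaseMapA.get? "" = none from by decide]
    · rw [if_neg h0]
      by_cases hc : pvBaseMapA.contains (PySem.Str.strip u) = true
      · rw [if_pos hc]
      · rw [if_neg hc]
        have hgt : pvBaseMapA.get? (PySem.Str.strip u) = none := pv_not_contains_get? _ _ hc
        by_cases hg : PySem.Str.startswith (PySem.Str.strip u) "L<" = true ∧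
            PySem.Str.endswith (PySem.Str.strip u) ">" = true ∧
            3 < PySem.Str.len (PySem.Str.strip u)
        · rw [if_pos hg]
          have hlen := pv_term u hg.2.2
          have hIH := ih
            (PySem.Str.strip (PySem.Str.slice (PySem.Str.strip u) (some 2) (some (-1))))
            (by omega)
          rw [pv_str_strip_idem] at hIH
          cases hA : pvA_go n
              (PySem.Str.strip (PySem.Str.slice (PySem.Str.strip u) (some 2) (some (-1)))) with
          | none => simp [hgt]
          | some e =>
            rw [hA] at hIH
            simp only [Option.bind_some] at hIH ⊢
            rw [pv_ifL, hIH, hgt]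
            simp [pv_double_none]
        · rw [if_neg hg]
          simp [hgt]

theorem pv_main (s : String) :
    map_type_mapping_token_to_server_var_type_int s
      = map_type_mapping_token_to_server_var_type_int_alt s := by
  unfold map_type_mapping_token_to_server_var_type_int
  simp only [pvA_go]
  unfold map_type_mapping_token_to_server_var_type_int_alt
  by_cases h0 : PySem.Str.strip s = ""
  · rw [if_pos h0, h0]
    have c1 : pvBaseMapA.contains "" = false := by decide
    have c2 : PySem.Str.startswith "" "L<" = false := by decide
    simp [c1]
  · rw [if_neg h0]
    by_cases hc : pvBaseMapA.contains (PySem.Str.strip s) = true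
    · rw [if_pos hc, if_pos hc]
    · rw [if_neg hc, if_neg hc]
      have hgt : pvBaseMapA.get? (PySem.Str.strip s) = none := pv_not_contains_get? _ _ hc
      by_cases hg : PySem.Str.startswith (PySem.Str.strip s) "L<" = true ∧
          PySem.Str.endswith (PySem.Str.strip s) ">" = true ∧
          3 < PySem.Str.len (PySem.Str.strip s)
      · rw [if_pos hg, if_pos hg]
        have hin := pv_bindL_aux s.toList.length
          (PySem.Str.strip (PySem.Str.slice (PySem.Str.strip s) (some 2) (some (-1))))
          (by have := pv_term s hg.2.2; omega)
        rw [pv_str_strip_idem] at hin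
        cases hA : pvA_go s.toList.length
            (PySem.Str.strip (PySem.Str.slice (PySem.Str.strip s) (some 2) (some (-1)))) with
        | none =>
          rw [hA] at hin
          cases hB : pvBaseMapA.get?
              (PySem.Str.strip (PySem.Str.slice (PySem.Str.strip s) (some 2) (some (-1)))) with
          | none => simp
          | some v =>
            rw [hB] at hin
            simp only [Option.bind_none, Option.bind_some] at hin
            simp only []
            rw [show pvListMapA.get? v = pvF v from rfl, ← hin]
        | some e =>
          rw [hA] at hin
          cases hB : pvBaseMapA.get?
              (PySem.Str.strip (PySem.Str.slice (PySem.Str.strip s) (some 2) (some (-1)))) with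
          | none =>
            rw [hB] at hin
            simp only [Option.bind_none, Option.bind_some] at hin
            simp only []
            rw [pv_ifL, hin]
          | some v =>
            rw [hB] at hin
            simp only [Option.bind_some] at hin
            simp only []
            rw [pv_ifL, hin]
            rfl
      · rw [if_neg hg, if_neg hg]

-- ===== VERDICT (by name: the statement is the Claim_ definition above) =====
theorem map_type_mapping_token_to_server_var_type_int_spec : Claim_equal_map_type_mapping_token_to_server_var_type_int := by
  intro s _
  unfold Spec_map_type_mapping_token_to_server_var_type_int
  exact pv_main s
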